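-- pv_equiv track=rewrite | github.com/JameyCalbreze/AdventOfCode2020 | day06/problem1.py | solve
-- ===== SOURCE A (Python) =====
-- def solve(rows):
--   count = 0
--   cur_set = set()
--   for row in rows:
--     if row == "":
--       count += len(cur_set)
--       cur_set = set()
--     else:
--       for letter in row:
--         cur_set.add(letter)
--   count += len(cur_set)
--   return count
-- ===== SOURCE B (Python) =====
-- def solve(rows):
--     # Different decomposition: recursively split at the first blank-line separator,
--     # scoring each group as len(set("".join(group))).
--     if "" in rows:
--         i = rows.index("")
--         return len(set("".join(rows[:i]))) + solve(rows[i + 1:])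
--     return len(set("".join(rows)))
-- ===== Notes on version B (the rewrite author's own statement) =====
-- stated objective: alternative
-- what changed: Replaces A's single stateful loop carrying (count, running set) by a recursive divide-at-first-separator decomposition: find the first "" with rows.index, score the prefix group as len(set("".join(prefix))), and recurse on the rest.
import Mathlib
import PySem

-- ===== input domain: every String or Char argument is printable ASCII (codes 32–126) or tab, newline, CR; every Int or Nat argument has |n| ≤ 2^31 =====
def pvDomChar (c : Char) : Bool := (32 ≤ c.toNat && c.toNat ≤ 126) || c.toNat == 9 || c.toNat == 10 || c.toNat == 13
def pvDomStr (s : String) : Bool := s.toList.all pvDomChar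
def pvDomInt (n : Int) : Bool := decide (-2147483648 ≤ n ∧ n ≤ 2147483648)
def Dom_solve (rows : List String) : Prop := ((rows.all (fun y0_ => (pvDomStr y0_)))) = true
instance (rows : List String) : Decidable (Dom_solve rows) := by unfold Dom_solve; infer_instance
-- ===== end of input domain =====

-- B replaces A's stateful scan by a recursive split at the first "" separator (alternative decomposition, same cost).

-- ===== PORT A =====
def solve (rows : List String) : Int :=
  let st := rows.foldl
    (fun (st : Int × PySem.Set Char) row =>
      if row = "" then (st.1 + PySem.Set.len st.2, PySem.Set.empty)
      else (st.1, row.toList.foldl PySem.Set.add st.2))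
    (0, PySem.Set.empty)
  st.1 + PySem.Set.len st.2

-- ===== PORT B =====
def solve_alt (rows : List String) : Int :=
  if h : "" ∈ rows then
    let i := rows.idxOf ""
    PySem.Set.len (PySem.Set.ofList ((rows.take i).flatMap String.toList)) +
      solve_alt (rows.drop (i + 1))
  else
    PySem.Set.len (PySem.Set.ofList (rows.flatMap String.toList))
termination_by rows.length
decreasing_by
  have := List.idxOf_lt_length_of_mem h
  simp [List.length_drop]; omega

-- ===== PRECONDITION & SPEC =====
def Spec_solve (rows : List String) (out : Int) : Prop := out = solve_alt rows
instance (rows : List String) (out : Int) : Decidable (Spec_solve rows out) := by unfold Spec_solve; infer_instance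

-- ===== CLAIM (what is proved, stated in full; the proofs are below) =====
def Claim_equal_solve : Prop := ∀ (rows : List String), Dom_solve rows → Spec_solve rows (solve rows)

-- ===== LEMMAS AND PROOFS =====

-- reference function: the remaining count given the current running set
def gW (cur : PySem.Set Char) : List String → Int
  | [] => PySem.Set.len cur
  | r :: rs =>
    if r = "" then PySem.Set.len cur + gW PySem.Set.empty rs
    else gW (r.toList.foldl PySem.Set.add cur) rs

theorem solve_fold_eq_gW (rows : List String) (c : Int) (cur : PySem.Set Char) :
    (rows.foldl
      (fun (st : Int × PySem.Set Char) row =>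
        if row = "" then (st.1 + PySem.Set.len st.2, PySem.Set.empty)
        else (st.1, row.toList.foldl PySem.Set.add st.2))
      (c, cur)).1 +
    PySem.Set.len (rows.foldl
      (fun (st : Int × PySem.Set Char) row =>
        if row = "" then (st.1 + PySem.Set.len st.2, PySem.Set.empty)
        else (st.1, row.toList.foldl PySem.Set.add st.2))
      (c, cur)).2 = c + gW cur rows := by
  induction rows generalizing c cur with
  | nil => simp [gW]
  | cons r rs ih =>
    by_cases hr : r = ""
    · simp only [List.foldl_cons, if_pos hr, gW, if_pos]
      rw [ih]; ring
    · simp only [List.foldl_cons, gW, if_neg hr]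
      exact ih _ _

theorem gW_no_blank (rows : List String) (cur : PySem.Set Char) (h : "" ∉ rows) :
    gW cur rows = PySem.Set.len ((rows.flatMap String.toList).foldl PySem.Set.add cur) := by
  induction rows generalizing cur with
  | nil => simp [gW]
  | cons r rs ih =>
    have hr : r ≠ "" := fun e => h (e ▸ List.mem_cons_self)
    simp only [gW, if_neg hr, List.flatMap_cons, List.foldl_append]
    exact ih _ (fun e => h (List.mem_cons_of_mem _ e))

theorem gW_split (pre post : List String) (cur : PySem.Set Char) (h : "" ∉ pre) :
    gW cur (pre ++ "" :: post) =
      PySem.Set.len ((pre.flatMap String.toList).foldl PySem.Set.add cur) +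
        gW PySem.Set.empty post := by
  induction pre generalizing cur with
  | nil => simp [gW]
  | cons r rs ih =>
    have hr : r ≠ "" := fun e => h (e ▸ List.mem_cons_self)
    simp only [List.cons_append, gW, if_neg hr, List.flatMap_cons, List.foldl_append]
    exact ih _ (fun e => h (List.mem_cons_of_mem _ e))

theorem blank_not_mem_take_idxOf (l : List String) : "" ∉ l.take (l.idxOf "") := by
  induction l with
  | nil => simp
  | cons r rs ih =>
    by_cases hr : r = ""
    · subst hr; simp
    · rw [List.idxOf_cons_ne _ (by simpa using hr)]
      simp only [List.take_succ_cons, List.mem_cons]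
      rintro (e | hmem)
      · exact hr e.symm
      · exact ih hmem

theorem solve_alt_eq_gW_aux (n : Nat) :
    ∀ rows : List String, rows.length ≤ n → solve_alt rows = gW PySem.Set.empty rows := by
  induction n with
  | zero =>
    intro rows hn
    have : rows = [] := List.eq_nil_of_length_eq_zero (Nat.le_zero.mp hn)
    subst this
    rw [solve_alt]
    simp [gW]
  | succ n ih =>
    intro rows hn
    rw [solve_alt]
    by_cases h : "" ∈ rows
    · have hi := List.idxOf_lt_length_of_mem h
      have hsplit : rows = rows.take (rows.idxOf "") ++ "" :: rows.drop (rows.idxOf "" + 1) := by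
        conv_lhs => rw [← List.take_append_drop (rows.idxOf "") rows]
        rw [List.drop_eq_getElem_cons hi, List.getElem_idxOf hi]
      have hpre : "" ∉ rows.take (rows.idxOf "") := blank_not_mem_take_idxOf rows
      simp only [dif_pos h]
      rw [ih _ (by simp only [List.length_drop]; omega)]
      conv_rhs => rw [hsplit]
      rw [gW_split _ _ _ hpre, PySem.Set.ofList_eq_foldl]
      rfl
    · simp only [dif_neg h]
      rw [gW_no_blank _ _ h, PySem.Set.ofList_eq_foldl]
      rfl

theorem solve_alt_eq_gW (rows : List String) : solve_alt rows = gW PySem.Set.empty rows :=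
  solve_alt_eq_gW_aux rows.length rows le_rfl

-- ===== VERDICT (by name: the statement is the Claim_ definition above) =====
theorem solve_spec : Claim_equal_solve := by
  intro rows _
  unfold Spec_solve solve
  rw [solve_alt_eq_gW]
  simpa using solve_fold_eq_gW rows 0 PySem.Set.empty
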